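-- pv_equiv track=rewrite | github.com/SylvainDe/aoc2020 | day20.py | water_roughness
-- ===== SOURCE A (Python) =====
-- def rotate(matrix):
--     # https://stackoverflow.com/questions/8421337/rotating-a-two-dimensional-array-in-python
--     return list(zip(*matrix[::-1]))
--
-- def get_rotations_and_symetries(tile):
--     t = tile
--     yield t
--     for i in range(3):
--         t = rotate(t)
--         yield t
--     t = t[::-1]
--     yield t
--     for i in range(3):
--         t = rotate(t)
--         yield t
--
-- def get_caracter_positions(matrix, char):
--     return set(
--         (i, j) for i, line in enumerate(matrix) for j, c in enumerate(line) if c == char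
--     )
--
-- def water_roughness(monster, image):
--     water_hashes = get_caracter_positions(image, "#")
--     found_hashes = set()
--     for m in get_rotations_and_symetries(monster):
--         monster_hashes = get_caracter_positions(m, "#")
--         for i in range(len(image)):
--             for j in range(len(image)):
--                 positions = [(mx + i, my + j) for mx, my in monster_hashes]
--                 if all(pos in water_hashes for pos in positions):
--                     found_hashes.update(positions)
--     return len(water_hashes) - len(found_hashes)
-- ===== SOURCE B (Python) =====
-- def _rotate(matrix):
--     return list(zip(*matrix[::-1]))
--
-- def _orientations(t):
--     ts = [t]
--     for _ in range(3):
--         ts.append(_rotate(ts[-1]))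
--     ts.append(ts[-1][::-1])
--     for _ in range(3):
--         ts.append(_rotate(ts[-1]))
--     return ts
--
-- def _hash_list(matrix):
--     return [(i, j) for i, row in enumerate(matrix) for j, c in enumerate(row) if c == "#"]
--
-- def water_roughness(monster, image):
--     water = set(_hash_list(image))
--     n = len(image)
--     found = set()
--     for m in _orientations(monster):
--         mh = _hash_list(m)
--         if not mh:
--             continue
--         rx, ry = mh[0]
--         for wx, wy in water:
--             i, j = wx - rx, wy - ry
--             if 0 <= i < n and 0 <= j < n:
--                 cells = [(mx + i, my + j) for mx, my in mh]
--                 if all(p in water for p in cells):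
--                     found.update(cells)
--     return len(water) - len(found)
-- ===== Notes on version B (the rewrite author's own statement) =====
-- stated objective: faster
-- what changed: Instead of scanning all len(image) x len(image) grid offsets per orientation, B anchors on the sparse set of '#' cells: for each orientation it fixes the monster's first '#' cell as a reference and tries only water hashes as its landing spot, skipping orientations with no '#'.
import Mathlib
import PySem

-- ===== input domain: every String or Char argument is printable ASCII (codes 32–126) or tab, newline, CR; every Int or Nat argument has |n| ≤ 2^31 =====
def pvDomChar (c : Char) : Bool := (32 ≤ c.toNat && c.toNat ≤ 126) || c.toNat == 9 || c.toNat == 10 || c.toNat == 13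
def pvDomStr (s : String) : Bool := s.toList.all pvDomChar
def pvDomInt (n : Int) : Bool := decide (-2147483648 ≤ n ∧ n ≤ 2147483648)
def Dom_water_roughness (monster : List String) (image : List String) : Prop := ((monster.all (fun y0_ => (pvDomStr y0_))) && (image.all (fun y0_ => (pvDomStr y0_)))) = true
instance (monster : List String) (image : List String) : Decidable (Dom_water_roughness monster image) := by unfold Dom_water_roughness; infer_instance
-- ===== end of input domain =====

-- B replaces A's dense scan over all len(image)^2 offsets per orientation by iterating only the
-- sparse set of water '#' cells as anchors for the monster's first '#' cell (objective: faster).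

-- ===== PORT A =====
-- rotate(matrix) = list(zip(*matrix[::-1])); zip truncates to the shortest row, and the getD
-- default is never used because j < every row's length (exact for zip's truncation semantics).
def pyRotate (m : List (List Char)) : List (List Char) :=
  let r := m.reverse
  match (r.map List.length).min? with
  | none => []
  | some k => (List.range k).map (fun j => r.map (fun row => row.getD j ' '))

-- the 8 matrices yielded by get_rotations_and_symetries, in yield order
def pyOrientations (t0 : List (List Char)) : List (List (List Char)) :=
  let t1 := pyRotate t0
  let t2 := pyRotate t1
  let t3 := pyRotate t2
  let t4 := t3.reverse
  let t5 := pyRotate t4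
  let t6 := pyRotate t5
  let t7 := pyRotate t6
  [t0, t1, t2, t3, t4, t5, t6, t7]

-- [(i, j) for i, line in enumerate(matrix) for j, c in enumerate(line) if c == char]
def charPosList (m : List (List Char)) (c : Char) : List (Int × Int) :=
  (PySem.List.enumerate m 0).flatMap (fun p =>
    (PySem.List.enumerate p.2 0).filterMap (fun q => if q.2 = c then some (p.1, q.1) else none))

-- get_caracter_positions(matrix, char)
def getCharPositions (m : List (List Char)) (c : Char) : PySem.Set (Int × Int) :=
  PySem.Set.ofList (charPosList m c)

def water_roughness (monster : List String) (image : List String) : Int :=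
  let water := getCharPositions (image.map String.toList) '#'
  let found := (pyOrientations (monster.map String.toList)).foldl (fun found m =>
    let mh := getCharPositions m '#'
    (PySem.List.pyRange 0 (image.length : Int) 1).foldl (fun found i =>
      (PySem.List.pyRange 0 (image.length : Int) 1).foldl (fun found j =>
        let positions := mh.map (fun p => (p.1 + i, p.2 + j))
        if positions.all (fun pos => PySem.Set.contains water pos) then
          PySem.Set.update found positions
        else found) found) found) PySem.Set.empty
  PySem.Set.len water - PySem.Set.len found

-- ===== PORT B =====
def water_roughness_alt (monster : List String) (image : List String) : Int :=
  let water := PySem.Set.ofList (charPosList (image.map String.toList) '#')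
  let n : Int := image.length
  let found := (pyOrientations (monster.map String.toList)).foldl (fun found m =>
    match charPosList m '#' with
    | [] => found
    | (rx, ry) :: rest =>
      let mh := (rx, ry) :: rest
      water.foldl (fun found w =>
        let i := w.1 - rx
        let j := w.2 - ry
        if 0 ≤ i ∧ i < n ∧ 0 ≤ j ∧ j < n then
          let cells := mh.map (fun p => (p.1 + i, p.2 + j))
          if cells.all (fun p => PySem.Set.contains water p) then
            PySem.Set.update found cells
          else found
        else found) found) PySem.Set.empty
  PySem.Set.len water - PySem.Set.len found

-- ===== PRECONDITION & SPEC =====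
def Spec_water_roughness (monster : List String) (image : List String) (out : Int) : Prop := out = water_roughness_alt monster image
instance (monster : List String) (image : List String) (out : Int) : Decidable (Spec_water_roughness monster image out) := by unfold Spec_water_roughness; infer_instance

-- ===== CLAIM (what is proved, stated in full; the proofs are below) =====
def Claim_equal_water_roughness : Prop := ∀ (monster : List String) (image : List String), Dom_water_roughness monster image → Spec_water_roughness monster image (water_roughness monster image)

-- ===== LEMMAS AND PROOFS =====

theorem mem_foldl_body {α β : Type} [BEq α] [LawfulBEq α]
    (g : PySem.Set α → β → PySem.Set α) (P : β → α → Prop)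
    (hg : ∀ s b x, x ∈ g s b ↔ x ∈ s ∨ P b x) :
    ∀ (l : List β) (s : PySem.Set α) (x : α),
      x ∈ l.foldl g s ↔ x ∈ s ∨ ∃ b ∈ l, P b x := by
  intro l
  induction l with
  | nil => simp
  | cons b l ih =>
    intro s x
    simp [List.foldl_cons, ih, hg]
    tauto

theorem nodup_foldl_body {α β : Type} [BEq α]
    (g : PySem.Set α → β → PySem.Set α)
    (hg : ∀ s b, s.Nodup → (g s b).Nodup) :
    ∀ (l : List β) (s : PySem.Set α), s.Nodup → (l.foldl g s).Nodup := by
  intro l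
  induction l with
  | nil => intro s hs; simpa using hs
  | cons b l ih => intro s hs; exact ih _ (hg _ _ hs)

-- x ∈ the conditional-update step ↔ x was already there, or the check passed and x is a cell
theorem mem_condUpdate {W s : PySem.Set (Int × Int)} {cells : List (Int × Int)} {x : Int × Int} :
    (x ∈ if cells.all (fun pos => PySem.Set.contains W pos) then PySem.Set.update s cells else s)
    ↔ x ∈ s ∨ ((∀ p ∈ cells, p ∈ W) ∧ x ∈ cells) := by
  split_ifs with h
  · simp only [List.all_eq_true, PySem.Set.contains_iff] at h
    simp only [PySem.Set.mem_update]
    tauto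
  · simp only [List.all_eq_true, PySem.Set.contains_iff] at h
    tauto

theorem nodup_condUpdate {W s : PySem.Set (Int × Int)} {cells : List (Int × Int)}
    (hs : s.Nodup) :
    (if cells.all (fun pos => PySem.Set.contains W pos) then PySem.Set.update s cells else s).Nodup := by
  split_ifs
  · exact PySem.Set.nodup_update _ _ hs
  · exact hs

-- what one orientation of A's dense scan can add: an in-bounds offset (i, j) whose shifted
-- monster cells all lie in W, with x one of those shifted cells
def OrientHit (W : PySem.Set (Int × Int)) (n : Int) (l : List (Int × Int)) (x : Int × Int) : Prop :=
  ∃ i ∈ PySem.List.pyRange 0 n 1, ∃ j ∈ PySem.List.pyRange 0 n 1,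
    ((∀ p ∈ l, (p.1 + i, p.2 + j) ∈ W) ∧ ∃ p ∈ l, x = (p.1 + i, p.2 + j))

-- what one orientation of B's sparse scan can add: a water anchor for the first monster cell
def BHit (W : PySem.Set (Int × Int)) (n : Int) (l : List (Int × Int)) (x : Int × Int) : Prop :=
  match l with
  | [] => False
  | (rx, ry) :: rest =>
    ∃ w ∈ W, (0 ≤ w.1 - rx ∧ w.1 - rx < n ∧ 0 ≤ w.2 - ry ∧ w.2 - ry < n) ∧
      ((∀ p ∈ (rx, ry) :: rest, (p.1 + (w.1 - rx), p.2 + (w.2 - ry)) ∈ W) ∧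
       ∃ p ∈ (rx, ry) :: rest, x = (p.1 + (w.1 - rx), p.2 + (w.2 - ry)))

theorem orientHit_iff_bHit (W : PySem.Set (Int × Int)) (n : Int) (l : List (Int × Int))
    (x : Int × Int) : OrientHit W n l x ↔ BHit W n l x := by
  cases l with
  | nil => simp [OrientHit, BHit]
  | cons hd rest =>
    obtain ⟨rx, ry⟩ := hd
    constructor
    · rintro ⟨i, hi, j, hj, hall, p, hp, hx⟩
      rw [PySem.List.mem_pyRange_one] at hi hj
      refine ⟨(rx + i, ry + j), hall (rx, ry) (by simp), ⟨by simp; omega, by simp; omega,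
        by simp; omega, by simp; omega⟩, ?_, ⟨p, hp, ?_⟩⟩
      · simpa [show rx + i - rx = i from by ring, show ry + j - ry = j from by ring] using hall
      · simpa [show rx + i - rx = i from by ring, show ry + j - ry = j from by ring] using hx
    · rintro ⟨w, hw, ⟨h1, h2, h3, h4⟩, hall, p, hp, hx⟩
      exact ⟨w.1 - rx, by rw [PySem.List.mem_pyRange_one]; omega,
             w.2 - ry, by rw [PySem.List.mem_pyRange_one]; omega, hall, p, hp, hx⟩

-- A's inner loop over j
theorem memA_inner (W : PySem.Set (Int × Int)) (l : List (Int × Int)) (i : Int)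
    (js : List Int) (s : PySem.Set (Int × Int)) (x : Int × Int) :
    x ∈ js.foldl (fun found j =>
        let positions := (PySem.Set.ofList l).map (fun p => (p.1 + i, p.2 + j))
        if positions.all (fun pos => PySem.Set.contains W pos) then
          PySem.Set.update found positions
        else found) s
    ↔ x ∈ s ∨ ∃ j ∈ js, ((∀ p ∈ l, (p.1 + i, p.2 + j) ∈ W) ∧ ∃ p ∈ l, x = (p.1 + i, p.2 + j)) := by
  refine mem_foldl_body _
    (fun j y => (∀ p ∈ l, (p.1 + i, p.2 + j) ∈ W) ∧ ∃ p ∈ l, y = (p.1 + i, p.2 + j)) ?_ js s x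
  intro s j x
  dsimp only
  rw [mem_condUpdate]
  simp only [List.mem_map, PySem.Set.mem_ofList, eq_comm]
  refine or_congr Iff.rfl (and_congr ?_ Iff.rfl)
  constructor
  · intro h p hp; exact h _ ⟨p, hp, rfl⟩
  · rintro h p ⟨a, ha, rfl⟩; exact h a ha

-- A's double loop over (i, j)
theorem memA_orient (W : PySem.Set (Int × Int)) (n : Int) (l : List (Int × Int))
    (s : PySem.Set (Int × Int)) (x : Int × Int) :
    x ∈ (PySem.List.pyRange 0 n 1).foldl (fun found i =>
        (PySem.List.pyRange 0 n 1).foldl (fun found j =>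
          let positions := (PySem.Set.ofList l).map (fun p => (p.1 + i, p.2 + j))
          if positions.all (fun pos => PySem.Set.contains W pos) then
            PySem.Set.update found positions
          else found) found) s
    ↔ x ∈ s ∨ OrientHit W n l x := by
  unfold OrientHit
  exact mem_foldl_body _ _ (fun s i x => memA_inner W l i (PySem.List.pyRange 0 n 1) s x) _ s x

-- B's anchor loop over the water set
theorem memB_orient (W : PySem.Set (Int × Int)) (n : Int) (l : List (Int × Int))
    (s : PySem.Set (Int × Int)) (x : Int × Int) :
    x ∈ (match l with
         | [] => s
         | (rx, ry) :: rest =>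
           W.foldl (fun found (w : Int × Int) =>
             if 0 ≤ w.1 - rx ∧ w.1 - rx < n ∧ 0 ≤ w.2 - ry ∧ w.2 - ry < n then
               let cells := ((rx, ry) :: rest).map
                 (fun (p : Int × Int) => (p.1 + (w.1 - rx), p.2 + (w.2 - ry)))
               if cells.all (fun p => PySem.Set.contains W p) then
                 PySem.Set.update found cells
               else found
             else found) s)
    ↔ x ∈ s ∨ BHit W n l x := by
  cases l with
  | nil => simp [BHit]
  | cons hd rest =>
    obtain ⟨rx, ry⟩ := hd
    unfold BHit
    dsimp only
    refine mem_foldl_body _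
      (fun (w : Int × Int) y => (0 ≤ w.1 - rx ∧ w.1 - rx < n ∧ 0 ≤ w.2 - ry ∧ w.2 - ry < n) ∧
        ((∀ p ∈ (rx, ry) :: rest, (p.1 + (w.1 - rx), p.2 + (w.2 - ry)) ∈ W) ∧
         ∃ p ∈ (rx, ry) :: rest, y = (p.1 + (w.1 - rx), p.2 + (w.2 - ry)))) ?_ W s x
    intro s w x
    dsimp only
    by_cases hb : 0 ≤ w.1 - rx ∧ w.1 - rx < n ∧ 0 ≤ w.2 - ry ∧ w.2 - ry < n
    · rw [if_pos hb, mem_condUpdate]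
      simp only [List.mem_map, eq_comm]
      constructor
      · rintro (h | ⟨h1, h2⟩)
        · exact Or.inl h
        · exact Or.inr ⟨hb, fun p hp => h1 _ ⟨p, hp, rfl⟩, by
            obtain ⟨a, ha, rfl⟩ := h2; exact ⟨a, ha, rfl⟩⟩
      · rintro (h | ⟨_, h1, h2⟩)
        · exact Or.inl h
        · refine Or.inr ⟨fun p hp => ?_, ?_⟩
          · obtain ⟨a, ha, rfl⟩ := hp; exact h1 a ha
          · obtain ⟨a, ha, rfl⟩ := h2; exact ⟨a, ha, rfl⟩
    · rw [if_neg hb]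
      tauto

theorem nodupA_orient (W : PySem.Set (Int × Int)) (n : Int) (l : List (Int × Int))
    (s : PySem.Set (Int × Int)) (hs : s.Nodup) :
    ((PySem.List.pyRange 0 n 1).foldl (fun found i =>
        (PySem.List.pyRange 0 n 1).foldl (fun found j =>
          let positions := (PySem.Set.ofList l).map (fun p => (p.1 + i, p.2 + j))
          if positions.all (fun pos => PySem.Set.contains W pos) then
            PySem.Set.update found positions
          else found) found) s).Nodup := by
  refine nodup_foldl_body _ ?_ _ s hs
  intro s i hsi
  refine nodup_foldl_body _ ?_ _ s hsi
  intro s j hsj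
  exact nodup_condUpdate hsj

theorem nodupB_orient (W : PySem.Set (Int × Int)) (n : Int) (l : List (Int × Int))
    (s : PySem.Set (Int × Int)) (hs : s.Nodup) :
    (match l with
     | [] => s
     | (rx, ry) :: rest =>
       W.foldl (fun found (w : Int × Int) =>
         if 0 ≤ w.1 - rx ∧ w.1 - rx < n ∧ 0 ≤ w.2 - ry ∧ w.2 - ry < n then
           let cells := ((rx, ry) :: rest).map
             (fun (p : Int × Int) => (p.1 + (w.1 - rx), p.2 + (w.2 - ry)))
           if cells.all (fun p => PySem.Set.contains W p) then
             PySem.Set.update found cells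
           else found
         else found) s).Nodup := by
  cases l with
  | nil => exact hs
  | cons hd rest =>
    obtain ⟨rx, ry⟩ := hd
    refine nodup_foldl_body _ ?_ W s hs
    intro s w hsw
    dsimp only
    split_ifs with hb
    · exact PySem.Set.nodup_update _ _ hsw
    · exact hsw
    · exact hsw

theorem water_roughness_spec : Claim_equal_water_roughness := by
  intro monster image _
  unfold Spec_water_roughness water_roughness water_roughness_alt getCharPositions
  simp only []
  generalize PySem.Set.ofList (charPosList (image.map String.toList) '#') = W
  generalize pyOrientations (monster.map String.toList) = ms
  generalize (image.length : Int) = n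
  -- the two accumulated `found` sets hold exactly the same elements and are both nodup
  have hA : ∀ x, x ∈ ms.foldl (fun found m =>
      (PySem.List.pyRange 0 n 1).foldl (fun found i =>
        (PySem.List.pyRange 0 n 1).foldl (fun found j =>
          let positions := (PySem.Set.ofList (charPosList m '#')).map (fun p => (p.1 + i, p.2 + j))
          if positions.all (fun pos => PySem.Set.contains W pos) then
            PySem.Set.update found positions
          else found) found) found) PySem.Set.empty
      ↔ ∃ m ∈ ms, OrientHit W n (charPosList m '#') x := by
    intro x
    rw [mem_foldl_body _ _ (fun s m x => memA_orient W n (charPosList m '#') s x) ms PySem.Set.empty x]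
    simp [PySem.Set.empty]
  have hB : ∀ x, x ∈ ms.foldl (fun found m =>
      match charPosList m '#' with
      | [] => found
      | (rx, ry) :: rest =>
        W.foldl (fun found (w : Int × Int) =>
          if 0 ≤ w.1 - rx ∧ w.1 - rx < n ∧ 0 ≤ w.2 - ry ∧ w.2 - ry < n then
            let cells := ((rx, ry) :: rest).map (fun (p : Int × Int) => (p.1 + (w.1 - rx), p.2 + (w.2 - ry)))
            if cells.all (fun p => PySem.Set.contains W p) then
              PySem.Set.update found cells
            else found
          else found) found) PySem.Set.empty
      ↔ ∃ m ∈ ms, BHit W n (charPosList m '#') x := by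
    intro x
    rw [mem_foldl_body _ _ (fun s m x => memB_orient W n (charPosList m '#') s x) ms PySem.Set.empty x]
    simp [PySem.Set.empty]
  have hAnd : (ms.foldl (fun found m =>
      (PySem.List.pyRange 0 n 1).foldl (fun found i =>
        (PySem.List.pyRange 0 n 1).foldl (fun found j =>
          let positions := (PySem.Set.ofList (charPosList m '#')).map (fun p => (p.1 + i, p.2 + j))
          if positions.all (fun pos => PySem.Set.contains W pos) then
            PySem.Set.update found positions
          else found) found) found) PySem.Set.empty).Nodup :=
    nodup_foldl_body _ (fun s m hs => nodupA_orient W n (charPosList m '#') s hs) ms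
      PySem.Set.empty (by simp [PySem.Set.empty])
  have hBnd : (ms.foldl (fun found m =>
      match charPosList m '#' with
      | [] => found
      | (rx, ry) :: rest =>
        W.foldl (fun found (w : Int × Int) =>
          if 0 ≤ w.1 - rx ∧ w.1 - rx < n ∧ 0 ≤ w.2 - ry ∧ w.2 - ry < n then
            let cells := ((rx, ry) :: rest).map (fun (p : Int × Int) => (p.1 + (w.1 - rx), p.2 + (w.2 - ry)))
            if cells.all (fun p => PySem.Set.contains W p) then
              PySem.Set.update found cells
            else found
          else found) found) PySem.Set.empty).Nodup :=
    nodup_foldl_body _ (fun s m hs => nodupB_orient W n (charPosList m '#') s hs) ms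
      PySem.Set.empty (by simp [PySem.Set.empty])
  have hperm := (List.perm_ext_iff_of_nodup hAnd hBnd).mpr (fun x => by
    rw [hA x, hB x]
    simp only [orientHit_iff_bHit])
  simp only [PySem.Set.len]
  rw [hperm.length_eq]
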